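-- pv_equiv track=rewrite | github.com/raghul-tech/HackerRank-ProblemSloving-basic-Solution | MaximumCostofLaptopCount.py | maxCost
-- ===== SOURCE A (Python) =====
-- def maxCost(cost, labels, dailyCount):
--     # Write your code here
--      ans =  0
--      count = 0
--      costl = 0
--      for c,l in zip(cost,labels):
--          costl +=c
--          if l == "illegal":
--               continue
--          count +=1
--          if count == dailyCount:
--              ans = max(ans,costl)
--              count = 0
--              costl = 0
--      return ans
-- ===== SOURCE B (Python) =====
-- def maxCost(cost, labels, dailyCount):
--     if dailyCount <= 0:
--         return 0
--     # phase 1: cumulative cost totals, recorded at each legal item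
--     run = 0
--     legal_totals = []
--     for c, l in zip(cost, labels):
--         run += c
--         if l != "illegal":
--             legal_totals.append(run)
--     # phase 2: every dailyCount-th legal cumulative total is a batch boundary
--     boundaries = legal_totals[dailyCount - 1::dailyCount]
--     # phase 3: batch cost = difference of adjacent boundary totals; take the max
--     best = 0
--     prev = 0
--     for s in boundaries:
--         best = max(best, s - prev)
--         prev = s
--     return best
-- ===== Notes on version B (the rewrite author's own statement) =====
-- stated objective: alternative
-- what changed: Replaces A's single reset-counter loop (counter + running batch sum, reset when the counter hits dailyCount) by three phases: a running prefix-total recorded at every legal item, a step-slice taking each dailyCount-th legal total as batch boundary, and a max over adjacent boundary differences.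
import Mathlib
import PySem

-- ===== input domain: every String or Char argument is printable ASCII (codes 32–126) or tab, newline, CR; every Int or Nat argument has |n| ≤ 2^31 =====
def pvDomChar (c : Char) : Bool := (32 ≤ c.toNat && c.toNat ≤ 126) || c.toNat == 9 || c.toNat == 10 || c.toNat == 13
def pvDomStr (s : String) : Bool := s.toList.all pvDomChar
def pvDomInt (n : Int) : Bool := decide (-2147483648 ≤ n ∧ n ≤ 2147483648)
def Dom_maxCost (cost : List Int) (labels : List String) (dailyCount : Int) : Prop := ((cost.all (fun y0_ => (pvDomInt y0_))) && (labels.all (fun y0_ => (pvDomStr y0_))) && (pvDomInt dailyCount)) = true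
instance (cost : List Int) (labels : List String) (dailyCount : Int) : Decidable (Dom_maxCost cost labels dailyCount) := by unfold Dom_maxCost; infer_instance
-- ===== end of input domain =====

-- B replaces A's reset-counter loop by prefix totals at legal items, a step-slice of
-- boundaries, and a max of adjacent differences; same O(n) cost, alternative decomposition.

-- ===== PORT A =====
-- loop body of A: state (ans, count, costl), one zipped pair per step
def pvStepA (dailyCount : Int) (st : Int × Int × Int) (p : Int × String) : Int × Int × Int :=
  let costl := st.2.2 + p.1
  if p.2 = "illegal" then (st.1, st.2.1, costl)
  else if st.2.1 + 1 = dailyCount then (max st.1 costl, 0, 0)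
  else (st.1, st.2.1 + 1, costl)

def maxCost (cost : List Int) (labels : List String) (dailyCount : Int) : Int :=
  ((cost.zip labels).foldl (pvStepA dailyCount) (0, 0, 0)).1

-- ===== PORT B =====
-- phase 1 of Source B: running cumulative total `run`, recorded at each non-"illegal" item
def pvLegalTotals (run : Int) : List (Int × String) → List Int
  | [] => []
  | (c, l) :: t =>
    if l ≠ "illegal" then (run + c) :: pvLegalTotals (run + c) t
    else pvLegalTotals (run + c) t

-- hand port of the slice legal_totals[dailyCount-1::dailyCount]: exact for step d ≥ 1,
-- j = elements still to skip before the next kept one (initially d-1)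
def pvEvery (j d : Nat) : List Int → List Int
  | [] => []
  | x :: xs => if j = 0 then x :: pvEvery (d - 1) d xs else pvEvery (j - 1) d xs

-- phase 3 of Source B: state (best, prev)
def pvStepB (st : Int × Int) (s : Int) : Int × Int := (max st.1 (s - st.2), s)

def maxCost_alt (cost : List Int) (labels : List String) (dailyCount : Int) : Int :=
  if dailyCount ≤ 0 then 0
  else
    let totals := pvLegalTotals 0 (cost.zip labels)
    let boundaries := pvEvery (dailyCount - 1).toNat dailyCount.toNat totals
    (boundaries.foldl pvStepB (0, 0)).1

-- ===== PRECONDITION & SPEC =====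
def Spec_maxCost (cost : List Int) (labels : List String) (dailyCount : Int) (out : Int) : Prop := out = maxCost_alt cost labels dailyCount
instance (cost : List Int) (labels : List String) (dailyCount : Int) (out : Int) : Decidable (Spec_maxCost cost labels dailyCount out) := by unfold Spec_maxCost; infer_instance

-- ===== CLAIM (what is proved, stated in full; the proofs are below) =====
def Claim_equal_maxCost : Prop := ∀ (cost : List Int) (labels : List String) (dailyCount : Int), Dom_maxCost cost labels dailyCount → Spec_maxCost cost labels dailyCount (maxCost cost labels dailyCount)

-- ===== LEMMAS AND PROOFS =====

-- when dailyCount ≤ 0, A's trigger `count + 1 = dailyCount` never fires (count stays ≥ 0)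
lemma foldA_nonpos (d : Int) (hd : d ≤ 0) :
    ∀ (L : List (Int × String)) (ans count costl : Int), 0 ≤ count →
      (L.foldl (pvStepA d) (ans, count, costl)).1 = ans := by
  intro L
  induction L with
  | nil => intro ans count costl _; rfl
  | cons p t ih =>
    intro ans count costl hc
    simp only [List.foldl, pvStepA]
    by_cases hl : p.2 = "illegal"
    · rw [if_pos hl]
      exact ih ans count (costl + p.1) hc
    · rw [if_neg hl, if_neg (by omega)]
      exact ih ans (count + 1) (costl + p.1) (by omega)

-- main invariant: A's reset-loop equals B's boundary-difference fold
lemma foldA_eq_foldB (d : Int) (hd : 1 ≤ d) :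
    ∀ (L : List (Int × String)) (ans count costl run prev : Int),
      0 ≤ count → count < d → costl = run - prev →
      (L.foldl (pvStepA d) (ans, count, costl)).1
        = ((pvEvery (d - 1 - count).toNat d.toNat (pvLegalTotals run L)).foldl pvStepB (ans, prev)).1 := by
  intro L
  induction L with
  | nil => intro ans count costl run prev _ _ _; rfl
  | cons p t ih =>
    intro ans count costl run prev h0 h1 h2
    obtain ⟨c, l⟩ := p
    simp only [List.foldl, pvStepA, pvLegalTotals]
    by_cases hl : l = "illegal"
    · rw [if_pos hl, if_neg (show ¬ l ≠ "illegal" by simpa using hl)]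
      exact ih ans count (costl + c) (run + c) prev h0 h1 (by omega)
    · rw [if_neg hl, if_pos (show l ≠ "illegal" from hl)]
      by_cases htr : count + 1 = d
      · rw [if_pos htr]
        have hj : (d - 1 - count).toNat = 0 := by omega
        rw [hj]
        simp only [pvEvery, reduceIte, List.foldl_cons, pvStepB]
        rw [show costl + c = run + c - prev from by omega]
        rw [ih (max ans (run + c - prev)) 0 0 (run + c) (run + c) le_rfl (by omega) (by omega)]
        rw [show (d - 1 - 0 : Int).toNat = d.toNat - 1 from by omega]
      · rw [if_neg htr]
        have hj : (d - 1 - count).toNat ≠ 0 := by omega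
        rw [show pvEvery (d - 1 - count).toNat d.toNat ((run + c) :: pvLegalTotals (run + c) t)
              = pvEvery ((d - 1 - count).toNat - 1) d.toNat (pvLegalTotals (run + c) t) by
            simp [pvEvery, hj]]
        have hj2 : (d - 1 - count).toNat - 1 = (d - 1 - (count + 1)).toNat := by omega
        rw [hj2]
        exact ih ans (count + 1) (costl + c) (run + c) prev (by omega) (by omega) (by omega)

-- ===== VERDICT (by name: the statement is the Claim_ definition above) =====
theorem maxCost_spec : Claim_equal_maxCost := by
  intro cost labels dailyCount _
  unfold Spec_maxCost maxCost maxCost_alt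
  by_cases hd : dailyCount ≤ 0
  · rw [if_pos hd]
    exact foldA_nonpos dailyCount hd _ 0 0 0 le_rfl
  · rw [if_neg hd]
    have h := foldA_eq_foldB dailyCount (by omega) (cost.zip labels) 0 0 0 0 0 le_rfl (by omega) (by omega)
    simpa using h
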